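-- pv_equiv track=rewrite | github.com/super30admin/Binary-Search-2 | search-first-last-idx-sorted-array.py | searchFirstIndex
-- ===== SOURCE A (Python) =====
-- def searchFirstIndex(nums, target):
--     n = len(nums)
--     low = 0
--     high = n - 1
--
--     while low <= high:
--         mid = (low + high) // 2
--
--         # check if mid is the target?
--         if nums[mid] == target:
--             # if mid is the first idx, return mid
--             if mid == 0:
--                 return mid
--             # check if mid is the first occurence of the target or not by comparing with left neighbor
--             if nums[mid - 1] == nums[mid]:
--                 high = mid - 1
--             else:
--                 return mid    # if left neighbor != tgt, then its first occurence of the tgt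
--
--         # if mid != target, check whether it is on LHS or RHS of the array by comparing
--         elif nums[mid] > target:
--             high = mid - 1
--         else:
--             low = mid + 1
--
--     return -1  # if tgt not found, return -1
-- ===== SOURCE B (Python) =====
-- def searchFirstIndex(nums, target):
--     def go(seg, left, off):
--         # search inside the slice `seg`; `left` is the element just before it (None at the
--         # array's start), `off` its offset in the original array
--         if not seg:
--             return -1
--         m = (len(seg) - 1) // 2
--         v = seg[m]
--         prev = seg[m - 1] if m > 0 else left
--         if v == target and (prev is None or prev != v):
--             return off + m
--         if v >= target:
--             return go(seg[:m], left, off)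
--         return go(seg[m + 1:], v, off + m + 1)
--     return go(nums, None, 0)
-- ===== Notes on version B (the rewrite author's own statement) =====
-- stated objective: alternative
-- what changed: Replaces A's index-pair while loop (low/high bookkeeping, global indexing, neighbour read nums[mid-1]) by a divide-and-conquer recursion over actual list slices that carries the slice's offset and the element just left of the slice as a sentinel, folding A's three equality/neighbour branches into one found-test plus one >= comparison.
import Mathlib
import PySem

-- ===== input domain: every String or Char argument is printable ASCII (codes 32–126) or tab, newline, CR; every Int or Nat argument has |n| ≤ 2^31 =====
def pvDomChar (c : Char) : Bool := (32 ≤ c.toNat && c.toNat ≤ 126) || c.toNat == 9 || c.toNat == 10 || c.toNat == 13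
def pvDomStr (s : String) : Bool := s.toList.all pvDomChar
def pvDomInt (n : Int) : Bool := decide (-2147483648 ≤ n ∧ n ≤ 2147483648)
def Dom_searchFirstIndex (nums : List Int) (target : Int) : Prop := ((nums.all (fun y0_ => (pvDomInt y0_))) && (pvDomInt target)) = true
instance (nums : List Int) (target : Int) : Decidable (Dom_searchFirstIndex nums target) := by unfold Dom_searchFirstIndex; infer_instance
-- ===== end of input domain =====

-- B re-decomposes A's first-occurrence binary search as a recursion over explicit list slices
-- with a carried left-neighbour sentinel instead of a low/high index loop; equal on ALL inputs.


-- ===== PORT A =====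
-- A's while-loop as structural recursion on a fuel that over-counts the iterations
-- (each step shrinks high+1-low by at least 1, so nums.length + 1 is always enough; the
-- fuel-exhausted branch is unreachable on the call below). nums[mid] is ported as pyGetD
-- with default 0, exact because every index A reads satisfies 0 ≤ low ≤ mid ≤ high ≤ len-1.
def aLoop (nums : List Int) (target : Int) : Nat → Int → Int → Int
  | 0, _, _ => -1
  | fuel + 1, low, high =>
    if low ≤ high then
      let mid := PySem.Int.floordiv (low + high) 2
      let v := PySem.List.pyGetD nums mid 0
      if v = target then
        if mid = 0 then mid
        else if PySem.List.pyGetD nums (mid - 1) 0 = v then aLoop nums target fuel low (mid - 1)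
        else mid
      else if v > target then aLoop nums target fuel low (mid - 1)
      else aLoop nums target fuel (mid + 1) high
    else -1

def searchFirstIndex (nums : List Int) (target : Int) : Int :=
  aLoop nums target (nums.length + 1) 0 ((nums.length : Int) - 1)

-- ===== PORT B =====
-- B's recursive helper `go(seg, left, off)`, structural on a fuel that over-counts the depth
-- (each call strictly shrinks the slice, so nums.length + 1 is always enough; the exhausted
-- branch is unreachable on the call below). seg[m]/seg[m-1] are ported as pyGetD with
-- default 0, exact because 0 ≤ m ≤ len(seg) - 1 on every read.
def bGo (target : Int) : Nat → List Int → Option Int → Int → Int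
  | 0, _, _, _ => -1
  | fuel + 1, seg, left, off =>
    if seg = [] then -1
    else
      let m : Nat := (seg.length - 1) / 2
      let v := PySem.List.pyGetD seg (m : Int) 0
      let prev : Option Int := if 0 < m then some (PySem.List.pyGetD seg ((m : Int) - 1) 0) else left
      if v = target ∧ (prev = none ∨ prev ≠ some v) then off + (m : Int)
      else if v ≥ target then bGo target fuel (seg.take m) left off
      else bGo target fuel (seg.drop (m + 1)) (some v) (off + (m : Int) + 1)

def searchFirstIndex_alt (nums : List Int) (target : Int) : Int :=
  bGo target (nums.length + 1) nums none 0

-- ===== PRECONDITION & SPEC =====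
def Spec_searchFirstIndex (nums : List Int) (target : Int) (out : Int) : Prop := out = searchFirstIndex_alt nums target
instance (nums : List Int) (target : Int) (out : Int) : Decidable (Spec_searchFirstIndex nums target out) := by unfold Spec_searchFirstIndex; infer_instance

-- ===== CLAIM (what is proved, stated in full; the proofs are below) =====
def Claim_equal_searchFirstIndex : Prop := ∀ (nums : List Int) (target : Int), Dom_searchFirstIndex nums target → Spec_searchFirstIndex nums target (searchFirstIndex nums target)

-- ===== LEMMAS AND PROOFS =====

-- reading index i of the slice nums[a : a+b] is reading index a+i of nums
lemma pyGetD_drop_take (nums : List Int) (a b : Nat) (i : Int) (h0 : 0 ≤ i)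
    (hib : i < (b : Int)) (hab : a + b ≤ nums.length) :
    PySem.List.pyGetD ((nums.drop a).take b) i 0 = PySem.List.pyGetD nums ((a : Int) + i) 0 := by
  have hlen : ((nums.drop a).take b).length = b := by
    simp only [List.length_take, List.length_drop]; omega
  rw [PySem.List.pyGetD_eq_getElem _ 0 h0 (by omega),
      PySem.List.pyGetD_eq_getElem nums 0 (by omega) (by omega)]
  simp only [List.getElem_take, List.getElem_drop]
  congr 1
  omega

-- simulation invariant: A's interval (low, high) corresponds to B's state
-- (slice nums[low..high], left neighbour of low, offset low); both sides consume fuel in step.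
lemma go_sim (nums : List Int) (target : Int) :
    ∀ (fuel : Nat) (low high : Int), 0 ≤ low → high ≤ (nums.length : Int) - 1 →
      aLoop nums target fuel low high =
      bGo target fuel ((nums.drop low.toNat).take (high + 1 - low).toNat)
        (if low = 0 then none else some (PySem.List.pyGetD nums (low - 1) 0)) low := by
  intro fuel
  induction fuel with
  | zero => intro low high _ _; rfl
  | succ fuel ih =>
    intro low high hlow hhigh
    by_cases h : low ≤ high
    swap
    · -- empty interval: A returns -1, B sees the empty slice
      have hseg : ((nums.drop low.toNat).take (high + 1 - low).toNat) = [] := by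
        have : (high + 1 - low).toNat = 0 := by omega
        simp [this]
      rw [aLoop, bGo, if_neg h, if_pos hseg]
    · set w : Nat := (high + 1 - low).toNat with hw
      set seg : List Int := (nums.drop low.toNat).take w with hseg
      have hlen : seg.length = w := by
        simp only [hseg, List.length_take, List.length_drop]
        omega
      have hne : ¬ seg = [] := by
        intro he; rw [he] at hlen; simp at hlen; omega
      rw [aLoop, bGo, if_pos h, if_neg hne]
      dsimp only
      set m : Nat := (seg.length - 1) / 2 with hm
      set mid : Int := PySem.Int.floordiv (low + high) 2 with hmid
      have hmid' : mid = (low + high) / 2 := PySem.Int.floordiv_eq_ediv_of_pos (by omega)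
      have hmidm : mid = low + (m : Int) := by
        rw [hmid']; rw [hlen] at hm; omega
      have hmw : m < w := by rw [hlen] at hm; omega
      have hm' : m = (w - 1) / 2 := by rw [hm, hlen]
      clear_value w seg m mid
      -- the probed value is the same element on both sides
      have hv : PySem.List.pyGetD seg (m : Int) 0 = PySem.List.pyGetD nums mid 0 := by
        rw [hseg, pyGetD_drop_take nums low.toNat w (m : Int) (by omega) (by omega) (by omega),
            show (low.toNat : Int) + (m : Int) = mid from by omega]
      rw [hv]
      set v : Int := PySem.List.pyGetD nums mid 0 with hvv
      clear_value v
      -- slice algebra for the two recursive calls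
      have hleft_seg : seg.take m = (nums.drop low.toNat).take ((mid - 1) + 1 - low).toNat := by
        rw [hseg, List.take_take]
        congr 1; omega
      have hright_seg : seg.drop (m + 1)
          = (nums.drop (mid + 1).toNat).take (high + 1 - (mid + 1)).toNat := by
        rw [hseg, List.drop_take, List.drop_drop]
        congr 1
        · omega
        · congr 1
          omega
      by_cases hmid0 : mid = 0
      · -- mid = 0 forces low = 0 and m = 0: B's sentinel is none
        have hm0 : ¬ 0 < m := by omega
        have hl0 : low = 0 := by omega
        rw [if_neg hm0, if_pos hl0]
        by_cases hvt : v = target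
        · rw [if_pos hvt, if_pos hmid0, if_pos ⟨hvt, Or.inl rfl⟩]
          omega
        · rw [if_neg hvt,
              if_neg (show ¬ (v = target ∧ ((none : Option Int) = none ∨ (none : Option Int) ≠ some v))
                from fun hc => hvt hc.1)]
          by_cases hgt : v > target
          · rw [if_pos hgt, if_pos (by omega : v ≥ target)]
            rw [ih low (mid - 1) hlow (by omega), hleft_seg, if_pos hl0]
          · rw [if_neg hgt, if_neg (by omega : ¬ v ≥ target)]
            rw [ih (mid + 1) high (by omega) hhigh, hright_seg,
                if_neg (by omega : ¬ mid + 1 = 0),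
                show mid + 1 - 1 = mid from by omega,
                show low + (m : Int) + 1 = mid + 1 from by omega, ← hvv]
      · -- mid ≠ 0: B's sentinel is exactly A's left neighbour nums[mid - 1]
        have hprev : (if 0 < m then some (PySem.List.pyGetD seg ((m : Int) - 1) 0) else
              (if low = 0 then none else some (PySem.List.pyGetD nums (low - 1) 0)))
            = some (PySem.List.pyGetD nums (mid - 1) 0) := by
          by_cases hmpos : 0 < m
          · rw [if_pos hmpos, hseg,
                pyGetD_drop_take nums low.toNat w ((m : Int) - 1) (by omega) (by omega) (by omega),
                show (low.toNat : Int) + ((m : Int) - 1) = mid - 1 from by omega]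
          · have hlow0 : ¬ low = 0 := by omega
            rw [if_neg hmpos, if_neg hlow0, show low - 1 = mid - 1 from by omega]
        rw [hprev]
        set p : Int := PySem.List.pyGetD nums (mid - 1) 0 with hp
        clear_value p
        by_cases hvt : v = target
        · rw [if_pos hvt, if_neg hmid0]
          by_cases hnb : p = v
          · -- duplicate to the left: both recurse on the left half
            rw [if_pos hnb,
                if_neg (show ¬ (v = target ∧ (some p = none ∨ some p ≠ some v))
                  from by simp [hnb]),
                if_pos (by omega : v ≥ target)]
            rw [ih low (mid - 1) hlow (by omega), hleft_seg]
          · -- left neighbour differs: both return mid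
            rw [if_neg hnb, if_pos ⟨hvt, Or.inr (by simp [hnb])⟩]
            omega
        · rw [if_neg hvt,
              if_neg (show ¬ (v = target ∧ (some p = none ∨ some p ≠ some v))
                from fun hc => hvt hc.1)]
          by_cases hgt : v > target
          · rw [if_pos hgt, if_pos (by omega : v ≥ target)]
            rw [ih low (mid - 1) hlow (by omega), hleft_seg]
          · rw [if_neg hgt, if_neg (by omega : ¬ v ≥ target)]
            rw [ih (mid + 1) high (by omega) hhigh, hright_seg,
                if_neg (by omega : ¬ mid + 1 = 0),
                show mid + 1 - 1 = mid from by omega,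
                show low + (m : Int) + 1 = mid + 1 from by omega, ← hvv]

-- ===== VERDICT (by name: the statement is the Claim_ definition above) =====
theorem searchFirstIndex_spec : Claim_equal_searchFirstIndex := by
  intro nums target _
  unfold Spec_searchFirstIndex searchFirstIndex searchFirstIndex_alt
  rw [go_sim nums target (nums.length + 1) 0 ((nums.length : Int) - 1) (by omega) (by omega)]
  congr 1
  simp
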